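-- pv_equiv track=rewrite | github.com/allenai/open-instruct | scripts/data/convert_tmax_tasks.py | parse_container_def
-- ===== SOURCE A (Python) =====
-- def parse_container_def(container_def: str) -> tuple[str, str]:
--     """Extract base image and %post commands from a Singularity/Apptainer def."""
--     image = "python:3.12-slim"
--     post_commands = ""
--
--     for line in container_def.splitlines():
--         stripped = line.strip()
--         if stripped.startswith("From:"):
--             image = stripped.split(":", 1)[1].strip()
--
--     in_post = False
--     post_lines = []
--     for line in container_def.splitlines():
--         if line.strip() == "%post":
--             in_post = True
--             continue
--         if line.strip().startswith("%") and in_post: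
--             break
--         if in_post:
--             post_lines.append(line)
--
--     post_commands = "\n".join(post_lines).strip()
--     return image, post_commands
-- ===== SOURCE B (Python) =====
-- def parse_container_def(container_def: str) -> tuple[str, str]:
--     """Extract base image and %post commands from a Singularity/Apptainer def."""
--     lines = container_def.splitlines()
--
--     # Last "From:" line wins -> scan backwards and stop at the first hit.
--     image = "python:3.12-slim"
--     for line in reversed(lines):
--         s = line.strip()
--         if s.startswith("From:"):
--             image = s.split(":", 1)[1].strip()
--             break
--
--     # Drop everything up to (and including) the first "%post" line, then
--     # collect lines until the next section header (skipping stray "%post" lines).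
--     while lines and lines[0].strip() != "%post":
--         lines = lines[1:]
--     body = []
--     for line in lines[1:]:
--         s = line.strip()
--         if s == "%post":
--             continue
--         if s.startswith("%"):
--             break
--         body.append(line)
--
--     return image, "\n".join(body).strip()
-- ===== Notes on version B (the rewrite author's own statement) =====
-- stated objective: alternative
-- what changed: Image is found by a backward scan that stops at the first 'From:' hit (instead of folding over every line keeping the last), and the %post block is obtained by dropping the prefix up to the first '%post' line and collecting until the next section header, replacing A's in_post flag machine.
import Mathlib
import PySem

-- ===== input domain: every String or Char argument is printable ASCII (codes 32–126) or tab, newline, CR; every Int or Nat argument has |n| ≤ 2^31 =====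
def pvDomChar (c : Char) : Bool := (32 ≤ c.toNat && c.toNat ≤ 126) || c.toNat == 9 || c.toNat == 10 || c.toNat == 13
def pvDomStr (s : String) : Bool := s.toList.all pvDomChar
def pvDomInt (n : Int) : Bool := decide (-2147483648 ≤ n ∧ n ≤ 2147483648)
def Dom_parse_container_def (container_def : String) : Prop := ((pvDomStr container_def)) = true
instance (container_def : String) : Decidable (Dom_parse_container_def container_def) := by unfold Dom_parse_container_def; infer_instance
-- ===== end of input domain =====

-- B replaces A's two forward passes by a backward first-hit scan for the image and a
-- drop-prefix-then-collect decomposition for the %post block (objective: alternative).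

-- ===== PORT A =====
-- step of A's first loop: last "From:" line wins
-- (the [1] index never raises: startswith "From:" guarantees a ":", so split(":",1) has 2 parts; .getD "" is unreachable)
def pvAFrom (img : String) (line : String) : String :=
  let stripped := PySem.Str.strip line
  if PySem.Str.startswith stripped "From:" then
    PySem.Str.strip ((PySem.List.pyGet? ((PySem.Str.splitMax? stripped ":" 1).getD []) 1).getD "")
  else img

-- A's second loop: in_post flag, continue on "%post", break on "%…" while in_post
def pvAPost : List String → Bool → List String → List String
  | [], _, acc => acc.reverse
  | line :: rest, in_post, acc =>
    if PySem.Str.strip line == "%post" then pvAPost rest true acc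
    else if PySem.Str.startswith (PySem.Str.strip line) "%" && in_post then acc.reverse
    else if in_post then pvAPost rest in_post (line :: acc)
    else pvAPost rest in_post acc

def parse_container_def (container_def : String) : String × String :=
  let lines := PySem.Str.splitlines container_def
  let image := lines.foldl pvAFrom "python:3.12-slim"
  let post_lines := pvAPost lines false []
  (image, PySem.Str.strip (PySem.Str.join "\n" post_lines))

-- ===== PORT B =====
-- value extracted from a "From:" line, none otherwise (same unreachable .getD "" as in A's port)
def pvBFrom? (line : String) : Option String :=
  let s := PySem.Str.strip line
  if PySem.Str.startswith s "From:" then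
    some (PySem.Str.strip ((PySem.List.pyGet? ((PySem.Str.splitMax? s ":" 1).getD []) 1).getD ""))
  else none

-- Source B's backward for-loop with break (applied to lines.reverse)
def pvBImage : List String → String
  | [] => "python:3.12-slim"
  | line :: rest => match pvBFrom? line with
    | some v => v
    | none => pvBImage rest

-- Source B's while-loop: drop lines until the first "%post" line
def pvBDrop : List String → List String
  | [] => []
  | line :: rest => if PySem.Str.strip line == "%post" then line :: rest else pvBDrop rest

-- Source B's collecting for-loop with continue/break
def pvBBody : List String → List String
  | [] => []
  | line :: rest =>
    let s := PySem.Str.strip line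
    if s == "%post" then pvBBody rest
    else if PySem.Str.startswith s "%" then []
    else line :: pvBBody rest

def parse_container_def_alt (container_def : String) : String × String :=
  let lines := PySem.Str.splitlines container_def
  (pvBImage lines.reverse,
   PySem.Str.strip (PySem.Str.join "\n" (pvBBody ((pvBDrop lines).drop 1))))

-- ===== PRECONDITION & SPEC =====
def Spec_parse_container_def (container_def : String) (out : String × String) : Prop := out = parse_container_def_alt container_def
instance (container_def : String) (out : String × String) : Decidable (Spec_parse_container_def container_def out) := by unfold Spec_parse_container_def; infer_instance

-- ===== CLAIM (what is proved, stated in full; the proofs are below) =====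
def Claim_equal_parse_container_def : Prop := ∀ (container_def : String), Dom_parse_container_def container_def → Spec_parse_container_def container_def (parse_container_def container_def)

-- ===== LEMMAS AND PROOFS =====

theorem pvAFrom_eq (img line : String) : pvAFrom img line = (pvBFrom? line).getD img := by
  simp only [pvAFrom, pvBFrom?]
  by_cases h : PySem.Str.startswith (PySem.Str.strip line) "From:" = true
  · simp only [h, if_true, Option.getD_some]
  · simp only [h, Bool.false_eq_true, if_false, Option.getD_none]

theorem foldl_pvAFrom (ls : List String) (img0 : String) :
    ls.foldl pvAFrom img0 = (ls.reverse.findSome? pvBFrom?).getD img0 := by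
  induction ls generalizing img0 with
  | nil => simp
  | cons l rest ih =>
    simp only [List.foldl_cons, List.reverse_cons, List.findSome?_append, ih, pvAFrom_eq]
    cases h : rest.reverse.findSome? pvBFrom? <;> cases h2 : pvBFrom? l <;> simp [h2, Option.or]

theorem pvBImage_eq (ls : List String) :
    pvBImage ls = (ls.findSome? pvBFrom?).getD "python:3.12-slim" := by
  induction ls with
  | nil => rfl
  | cons l rest ih =>
    simp only [pvBImage, List.findSome?]
    cases pvBFrom? l <;> simp [ih]

theorem pvAPost_true (ls : List String) (acc : List String) :
    pvAPost ls true acc = acc.reverse ++ pvBBody ls := by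
  induction ls generalizing acc with
  | nil => simp [pvAPost, pvBBody]
  | cons l rest ih =>
    simp only [pvAPost, pvBBody]
    by_cases h1 : (PySem.Str.strip l == "%post") = true
    · simp [h1, ih]
    · by_cases h2 : PySem.Chars.startswith (PySem.Chars.strip l.toList) ['%'] = true <;>
        simp [h1, h2, ih]

theorem pvAPost_false (ls : List String) (acc : List String) :
    pvAPost ls false acc = acc.reverse ++ pvBBody ((pvBDrop ls).drop 1) := by
  induction ls generalizing acc with
  | nil => simp [pvAPost, pvBDrop, pvBBody]
  | cons l rest ih =>
    simp only [pvAPost, pvBDrop]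
    by_cases h1 : (PySem.Str.strip l == "%post") = true
    · simp [h1, pvAPost_true]
    · simp [h1, ih]

-- ===== VERDICT (by name: the statement is the Claim_ definition above) =====
theorem parse_container_def_spec : Claim_equal_parse_container_def := by
  intro s _
  show parse_container_def s = parse_container_def_alt s
  simp only [parse_container_def, parse_container_def_alt]
  refine Prod.ext ?_ ?_
  · simp [foldl_pvAFrom, pvBImage_eq]
  · simp [pvAPost_false]
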